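-- pv_equiv track=rewrite | github.com/ZhaoxiangD/Predict-analysis-FL-LTR-RTs | finder-result-process.py | rm_repeat_family
-- ===== SOURCE A (Python) =====
-- def rm_repeat_family(result_final):
--     for i in range(len(result_final)):
--         family=''
--         result_final[i]['family']=result_final[i]['family'].split(' ')
--         result_final[i]['family']=sorted(result_final[i]['family'])[1:]
--         if len(result_final[i]['family']) > 1:
--             for i1 in range(len(result_final[i]['family'])-1,0,-1):
--                 if result_final[i]['family'][i1]==result_final[i]['family'][i1-1]:
--                     result_final[i]['family'].pop(i1)
--         for i2 in range(len(result_final[i]['family'])):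
--             family=family+' '+result_final[i]['family'][i2]
--         result_final[i]['family']=family[1:]
--     return result_final
-- ===== SOURCE B (Python) =====
-- def rm_repeat_family(result_final):
--     for record in result_final:
--         fam = sorted(record['family'].split(' '))[1:]
--         record['family'] = ' '.join(dict.fromkeys(fam))
--     return result_final
-- ===== Notes on version B (the rewrite author's own statement) =====
-- stated objective: simpler
-- what changed: Per record, A's guarded reverse-index adjacent-duplicate pop loop and its manual "family + ' ' + x" concatenation loop (with the final [1:] trim) are collapsed into the single expression ' '.join(dict.fromkeys(fam)); first-seen-order dedup equals adjacent dedup because fam is already sorted.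
import Mathlib
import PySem

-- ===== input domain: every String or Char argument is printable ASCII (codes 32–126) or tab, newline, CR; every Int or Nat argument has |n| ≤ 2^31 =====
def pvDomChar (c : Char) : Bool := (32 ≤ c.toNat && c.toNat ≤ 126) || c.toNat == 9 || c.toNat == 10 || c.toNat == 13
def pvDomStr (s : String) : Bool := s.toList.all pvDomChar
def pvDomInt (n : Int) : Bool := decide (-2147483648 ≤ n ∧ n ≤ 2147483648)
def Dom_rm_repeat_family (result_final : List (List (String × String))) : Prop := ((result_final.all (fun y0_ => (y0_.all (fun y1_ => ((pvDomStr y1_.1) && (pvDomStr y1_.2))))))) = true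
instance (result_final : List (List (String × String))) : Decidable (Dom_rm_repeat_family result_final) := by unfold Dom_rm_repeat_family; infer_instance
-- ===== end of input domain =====

-- B collapses A's two per-record inner loops (the reverse adjacent-duplicate pop loop and the manual
-- ' '+x concatenation loop) into one ' '.join(dict.fromkeys(fam)) expression; objective: simpler.
-- Both Pythons mutate result_final in place and return it (B performs the same mutation); the ports model the returned value.

-- ===== PORT A =====
-- record['family'] lookup; the `none` case (Python KeyError) is excluded by Pre_, `.getD ""` is unreachable there
def pvFamGet (rec : List (String × String)) : String :=
  ((PySem.Dict.mk rec).get? "family").getD ""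

-- record['family'] = v : Python dict assignment (overwrite keeps position); exact under Pre_'s unique-keys condition
def pvFamSet (rec : List (String × String)) (v : String) : List (String × String) :=
  ((PySem.Dict.mk rec).insert "family" v).items

-- 'for i1 in range(len(fam)-1, 0, -1): if fam[i1]==fam[i1-1]: fam.pop(i1)'
-- fam[i1] with 0 ≤ i1 < len is List.getD; fam.pop(i1) at an in-range index is List.eraseIdx
def pvPopLoop (xs : List String) : Nat → List String
  | 0 => xs
  | i + 1 => pvPopLoop (if xs.getD (i + 1) "" == xs.getD i "" then xs.eraseIdx (i + 1) else xs) i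

-- one iteration of A's outer loop (the body only touches record i)
def pvProcessA (rec : List (String × String)) : List (String × String) :=
  -- .split(' '): sep is nonempty, so split? is always `some`; `.getD []` is unreachable
  let fam0 := (PySem.Str.split? (pvFamGet rec) " ").getD []
  -- sorted(...)[1:] : a [1:] slice with nonnegative bound is List.drop 1
  let fam1 := (PySem.List.sorted fam0 (fun x => x)).drop 1
  let fam2 := if fam1.length > 1 then pvPopLoop fam1 (fam1.length - 1) else fam1
  -- "family = family + ' ' + fam2[i2]" over all indices, then family[1:]
  let family := fam2.foldl (fun acc x => acc ++ (' ' :: x.toList)) ([] : List Char)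
  pvFamSet rec (String.ofList (family.drop 1))

def rm_repeat_family : List (List (String × String)) → List (List (String × String))
  | [] => []
  | rec :: rest => pvProcessA rec :: rm_repeat_family rest

-- ===== PORT B =====
def rm_repeat_family_alt (result_final : List (List (String × String))) : List (List (String × String)) :=
  result_final.map (fun record =>
    let fam := (PySem.List.sorted ((PySem.Str.split? (pvFamGet record) " ").getD []) (fun x => x)).drop 1
    -- ' '.join(dict.fromkeys(fam))
    pvFamSet record (PySem.Str.join " " (PySem.List.dedup fam)))

-- ===== PRECONDITION & SPEC =====
-- Pre_ excludes records without a "family" key (Python raises KeyError there, in A and in B alike) and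
-- records whose association list has duplicate keys (a Python dict cannot carry duplicate keys, so such
-- lists do not represent any dict input of A).
def Pre_rm_repeat_family (result_final : List (List (String × String))) : Prop :=
  ∀ rec ∈ result_final, (rec.map Prod.fst).Nodup ∧ "family" ∈ rec.map Prod.fst
instance (result_final : List (List (String × String))) : Decidable (Pre_rm_repeat_family result_final) := by unfold Pre_rm_repeat_family; infer_instance

def pvWitness_rm_repeat_family : (List (List (String × String))) :=
  [[("family", "b a a"), ("chr", "1")], [("family", "")]]

def Spec_rm_repeat_family (result_final : List (List (String × String))) (out : List (List (String × String))) : Prop := out = rm_repeat_family_alt result_final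
instance (result_final : List (List (String × String))) (out : List (List (String × String))) : Decidable (Spec_rm_repeat_family result_final out) := by unfold Spec_rm_repeat_family; infer_instance

-- ===== CLAIM (what is proved, stated in full; the proofs are below) =====
def Claim_equal_rm_repeat_family : Prop := ∀ (result_final : List (List (String × String))), Dom_rm_repeat_family result_final → Pre_rm_repeat_family result_final → Spec_rm_repeat_family result_final (rm_repeat_family result_final)

-- ===== LEMMAS AND PROOFS =====

-- left-to-right adjacent dedup: the common normal form of A's pop loop and of dedup on a sorted list
def pvAdj : List String → List String
  | [] => []
  | [a] => [a]
  | a :: b :: t => if a == b then pvAdj (b :: t) else a :: pvAdj (b :: t)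

lemma pvGetD_at (ys : List String) (v : String) (rest : List String) :
    (ys ++ v :: rest).getD ys.length "" = v := by
  induction ys with
  | nil => rfl
  | cons a t ih => simp

lemma pvErase_at (ys : List String) (b c : String) (w : List String) :
    (ys ++ b :: c :: w).eraseIdx (ys.length + 1) = ys ++ b :: w := by
  induction ys with
  | nil => rfl
  | cons a t ih => simpa using ih

lemma pvAdj_snoc (ys : List String) (b c : String) :
    pvAdj (ys ++ [b, c]) = if b == c then pvAdj (ys ++ [b]) else pvAdj (ys ++ [b]) ++ [c] := by
  induction ys with
  | nil => by_cases h : b = c <;> simp [pvAdj, h]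
  | cons a t ih =>
    cases t with
    | nil => by_cases hab : a = b <;> by_cases hbc : b = c <;> simp [pvAdj, hab, hbc]
    | cons a2 t2 =>
      by_cases h : a = a2 <;> by_cases hbc : b = c <;>
        simp_all [pvAdj, List.cons_append]

lemma pvPopLoop_eq (zs : List String) (b : String) (w : List String) :
    pvPopLoop ((zs ++ [b]) ++ w) zs.length = pvAdj (zs ++ [b]) ++ w := by
  induction zs using List.reverseRecOn generalizing b w with
  | nil => simp [pvPopLoop, pvAdj]
  | append_singleton ys c ih =>
    have hlen : (ys ++ [c]).length = ys.length + 1 := by simp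
    have hshape : ((ys ++ [c]) ++ [b]) ++ w = ys ++ c :: b :: w := by simp
    rw [hlen, hshape]
    show pvPopLoop
        (if (ys ++ c :: b :: w).getD (ys.length + 1) "" == (ys ++ c :: b :: w).getD ys.length ""
         then (ys ++ c :: b :: w).eraseIdx (ys.length + 1) else ys ++ c :: b :: w) ys.length
      = pvAdj ((ys ++ [c]) ++ [b]) ++ w
    have h1 : (ys ++ c :: b :: w).getD (ys.length + 1) "" = b := by
      have := pvGetD_at (ys ++ [c]) b w
      simp only [List.append_assoc, List.cons_append, List.nil_append, List.length_append,
        List.length_cons, List.length_nil] at this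
      exact this
    have h2 : (ys ++ c :: b :: w).getD ys.length "" = c := pvGetD_at ys c (b :: w)
    rw [h1, h2]
    by_cases hcb : c = b
    · rw [if_pos (by simpa using hcb.symm), pvErase_at]
      have : ys ++ c :: w = (ys ++ [c]) ++ w := by simp
      rw [this, ih, List.append_assoc]
      simp [pvAdj_snoc, hcb]
    · rw [if_neg (by simpa using fun h => hcb h.symm)]
      have : ys ++ c :: b :: w = (ys ++ [c]) ++ ([b] ++ w) := by simp
      rw [this, ih, List.append_assoc]
      simp [pvAdj_snoc, hcb]

lemma pvGuard_eq (xs : List String) :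
    (if xs.length > 1 then pvPopLoop xs (xs.length - 1) else xs) = pvAdj xs := by
  induction xs using List.reverseRecOn with
  | nil => simp [pvAdj]
  | append_singleton zs b _ =>
    cases zs with
    | nil => simp [pvAdj]
    | cons a t =>
      have hl : ((a :: t) ++ [b]).length > 1 := by simp
      have hm : ((a :: t) ++ [b]).length - 1 = (a :: t).length := by simp
      rw [if_pos hl, hm]
      have := pvPopLoop_eq (a :: t) b []
      simpa using this

lemma pvDedup_eq_pvAdj (xs : List String) (h : xs.Pairwise (· ≤ ·)) :
    PySem.List.dedup xs = pvAdj xs := by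
  induction xs using List.reverseRecOn with
  | nil => rfl
  | append_singleton ys c ih =>
    have hys : ys.Pairwise (· ≤ ·) := List.Pairwise.sublist (List.sublist_append_left ys [c]) h
    have hle : ∀ x ∈ ys, x ≤ c := by
      intro x hx
      exact (List.pairwise_append.mp h).2.2 x hx c (by simp)
    rw [PySem.List.dedup_eq_ofList, PySem.Set.ofList_append_singleton, PySem.Set.add_eq_ite]
    rcases List.eq_nil_or_concat ys with rfl | ⟨zs, b, rfl⟩
    · simp [pvAdj, PySem.Set.ofList_nil]
    · simp only [List.concat_eq_append] at ih hys hle ⊢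
      have hmem : c ∈ PySem.Set.ofList (zs ++ [b]) ↔ b = c := by
        rw [PySem.Set.mem_ofList]
        constructor
        · intro hm
          rcases List.mem_append.mp hm with hz | hb
          · have h1 : c ≤ b := (List.pairwise_append.mp hys).2.2 c hz b (by simp)
            have h2 : b ≤ c := hle b (by simp)
            exact le_antisymm h2 h1
          · exact (List.mem_singleton.mp hb).symm
        · intro hb
          simp [← hb]
      have hsn : pvAdj ((zs ++ [b]) ++ [c])
          = if b == c then pvAdj (zs ++ [b]) else pvAdj (zs ++ [b]) ++ [c] := by
        have := pvAdj_snoc zs b c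
        simpa [List.append_assoc] using this
      rw [hsn]
      by_cases hbc : b = c
      · rw [if_pos (hmem.mpr hbc), if_pos (by simpa using hbc),
            ← PySem.List.dedup_eq_ofList, ih hys]
      · rw [if_neg (fun hm => hbc (hmem.mp hm)), if_neg (by simpa using hbc),
            ← PySem.List.dedup_eq_ofList, ih hys]

lemma pvFlat_drop (y : String) (t : List String) :
    y.toList ++ t.flatMap (fun x => ' ' :: x.toList)
      = PySem.Chars.join [' '] ((y :: t).map String.toList) := by
  induction t generalizing y with
  | nil => simp [PySem.Chars.join_singleton]
  | cons z t2 ih =>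
    have := ih z
    simp only [List.flatMap_cons, List.map_cons] at *
    rw [PySem.Chars.join_cons_cons, ← this]
    simp

lemma pvJoinFold (ys : List String) :
    String.ofList ((ys.foldl (fun acc x => acc ++ (' ' :: x.toList)) ([] : List Char)).drop 1)
      = PySem.Str.join " " ys := by
  apply String.toList_inj.mp
  rw [String.toList_ofList, PySem.Str.toList_join,
      PySem.List.foldl_append_eq_flatMap (fun x => ' ' :: x.toList) ys []]
  cases ys with
  | nil => rfl
  | cons y t =>
    simp only [List.nil_append, List.flatMap_cons, List.cons_append, List.drop_succ_cons,
      List.drop_zero]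
    have : (" " : String).toList = [' '] := rfl
    rw [this]
    exact pvFlat_drop y t

lemma pvRecord_eq (rec : List (String × String)) :
    pvProcessA rec
      = pvFamSet rec (PySem.Str.join " "
          (PySem.List.dedup
            ((PySem.List.sorted ((PySem.Str.split? (pvFamGet rec) " ").getD []) (fun x => x)).drop 1))) := by
  simp only [pvProcessA]
  have hp : ((PySem.List.sorted ((PySem.Str.split? (pvFamGet rec) " ").getD []) (fun x => x)).drop 1).Pairwise (· ≤ ·) := by
    have := PySem.List.sorted_pairwise ((PySem.Str.split? (pvFamGet rec) " ").getD []) (fun x => x)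
    exact List.Pairwise.sublist (List.drop_sublist 1 _) this
  rw [pvGuard_eq, pvJoinFold, ← pvDedup_eq_pvAdj _ hp]

-- ===== VERDICT (by name: the statement is the Claim_ definition above) =====
theorem rm_repeat_family_spec : Claim_equal_rm_repeat_family := by
  intro rf dom pre
  unfold Spec_rm_repeat_family
  induction rf with
  | nil => rfl
  | cons rec rest ih =>
    have hdom : Dom_rm_repeat_family rest := by
      unfold Dom_rm_repeat_family at dom ⊢
      simp only [List.all_cons, Bool.and_eq_true] at dom
      exact dom.2
    have hpre : Pre_rm_repeat_family rest := fun r hr => pre r (List.mem_cons_of_mem _ hr)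
    have halt : rm_repeat_family_alt (rec :: rest)
        = pvFamSet rec (PySem.Str.join " "
            (PySem.List.dedup
              ((PySem.List.sorted ((PySem.Str.split? (pvFamGet rec) " ").getD []) (fun x => x)).drop 1)))
          :: rm_repeat_family_alt rest := rfl
    rw [show rm_repeat_family (rec :: rest) = pvProcessA rec :: rm_repeat_family rest from rfl,
        halt, pvRecord_eq, ih hdom hpre]
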